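-- pv_equiv track=rewrite | github.com/c-yan/atcoder | agc/agc016/agc016_a.py | f
-- ===== SOURCE A (Python) =====
-- def f(s, c):
--     result = 0
--     while len(set(s)) != 1:
--         t = ''
--         for i in range(len(s) - 1):
--             if s[i] == c or s[i + 1] == c:
--                 t += c
--             else:
--                 t += s[i]
--         s = t
--         result += 1
--     return result
-- ===== SOURCE B (Python) =====
-- def f(s, c):
--     # Single backward pass: the answer is the largest "distance to the next
--     # occurrence of c" (positions past the last c count to the trimmed end).
--     if len(c) == 1 and c in s:
--         best = d = 0
--         for ch in reversed(s):
--             d = 0 if ch == c else d + 1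
--             if d > best:
--                 best = d
--         return best
--     # c never matches a character: each round just drops the last character,
--     # so we stop once the remaining prefix is uniform.
--     run = 1
--     while run < len(s) and s[run] == s[0]:
--         run += 1
--     return len(s) - run
-- ===== Notes on version B (the rewrite author's own statement) =====
-- stated objective: faster
-- what changed: A repeatedly rebuilds the string round by round until it is uniform; B computes the round count directly in one backward scan (largest distance to the next occurrence of c), with a prefix-run scan for the case where c never matches a character.
import Mathlib
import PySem

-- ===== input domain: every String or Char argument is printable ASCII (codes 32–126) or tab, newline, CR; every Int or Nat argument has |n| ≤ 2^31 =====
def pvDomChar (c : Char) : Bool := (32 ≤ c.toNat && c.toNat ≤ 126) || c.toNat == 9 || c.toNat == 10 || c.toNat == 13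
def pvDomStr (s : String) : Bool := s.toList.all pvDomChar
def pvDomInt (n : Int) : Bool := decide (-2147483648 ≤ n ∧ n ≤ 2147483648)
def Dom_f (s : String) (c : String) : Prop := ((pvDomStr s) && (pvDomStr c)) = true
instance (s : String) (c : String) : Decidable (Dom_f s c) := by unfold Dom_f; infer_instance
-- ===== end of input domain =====

-- B replaces A's repeated rebuild-the-string rounds by a single backward scan
-- (largest distance to the next occurrence of c; prefix-run scan when c never
-- matches a character); objective: faster.

-- ===== PORT A =====
-- Python `s[i] == c`: a one-character string compared with the string c (exact as list equality).
def pvMch (x : Char) (c : String) : Bool := [x] == c.toList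

-- one round: t = ''; for i in range(len(s)-1): t += c if (s[i]==c or s[i+1]==c) else s[i]
def pvStepA (l : List Char) (c : String) : List Char :=
  (PySem.List.pyRange 0 ((l.length : Int) - 1) 1).foldl
    (fun t i =>
      if pvMch (PySem.List.pyGetD l i ' ') c || pvMch (PySem.List.pyGetD l (i + 1) ' ') c
      then t ++ c.toList
      else t ++ [PySem.List.pyGetD l i ' ']) []

-- while len(set(s)) != 1: s = step(s); result += 1
-- (fuel only makes the recursion total; on Pre_f inputs the loop stops before the fuel runs out)
def pvLoopA : Nat → List Char → String → Int → Int
  | 0, _, _, result => result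
  | fuel + 1, l, c, result =>
    if PySem.Set.len (PySem.Set.ofList l) ≠ 1 then
      pvLoopA fuel (pvStepA l c) c (result + 1)
    else result

def f (s : String) (c : String) : Int := pvLoopA s.toList.length s.toList c 0


-- ===== PORT B =====
-- run = 1; while run < len(s) and s[run] == s[0]: run += 1   (count of leading chars equal to s[0] after it)
def pvPref (x : Char) : List Char → Nat
  | [] => 0
  | y :: ys => if y == x then 1 + pvPref x ys else 0

def pvRun (l : List Char) : Nat :=
  match l with
  | [] => 1
  | x :: xs => 1 + pvPref x xs

def pvRunBranch (l : List Char) : Int := (l.length : Int) - (pvRun l : Int)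

-- best = d = 0; for ch in reversed(s): d = 0 if ch == c else d + 1; best = max(best, d)
def pvScan (l : List Char) (d : Char) : Nat × Nat :=
  l.reverse.foldl
    (fun (bd : Nat × Nat) ch =>
      let d' := if ch == d then 0 else bd.2 + 1
      (if d' > bd.1 then d' else bd.1, d')) (0, 0)

def f_alt (s : String) (c : String) : Int :=
  let l := s.toList
  match c.toList with
  | [d] => if l.contains d then ((pvScan l d).1 : Int) else pvRunBranch l
  | _ => pvRunBranch l

-- ===== PRECONDITION & SPEC =====
-- A loops forever on the empty string (len(set('')) == 0 ≠ 1 and each round keeps '' unchanged);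
-- Pre_f excludes exactly that divergence.
def Pre_f (s : String) (c : String) : Prop := s.toList ≠ []
instance (s : String) (c : String) : Decidable (Pre_f s c) := by unfold Pre_f; infer_instance

def pvWitness_f : String × String := ("ab", "b")

def Spec_f (s : String) (c : String) (out : Int) : Prop := out = f_alt s c
instance (s : String) (c : String) (out : Int) : Decidable (Spec_f s c out) := by unfold Spec_f; infer_instance

-- ===== CLAIM (what is proved, stated in full; the proofs are below) =====
def Claim_equal_f : Prop := ∀ (s : String) (c : String), Dom_f s c → Pre_f s c → Spec_f s c (f s c)

-- ===== LEMMAS AND PROOFS =====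

-- recursive form of one round of A
def stepL (c : String) : List Char → List Char
  | x :: y :: xs => (if pvMch x c || pvMch y c then c.toList else [x]) ++ stepL c (y :: xs)
  | _ => []

def hfun (c : String) (l : List Char) (i : Int) : List Char :=
  if pvMch (PySem.List.pyGetD l i ' ') c || pvMch (PySem.List.pyGetD l (i + 1) ' ') c
  then c.toList
  else [PySem.List.pyGetD l i ' ']

lemma pvStepA_eq_flat (l : List Char) (c : String) :
    pvStepA l c = (PySem.List.pyRange 0 ((l.length : Int) - 1) 1).flatMap (hfun c l) := by
  unfold pvStepA
  have h : (fun (t : List Char) (i : Int) =>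
      if pvMch (PySem.List.pyGetD l i ' ') c || pvMch (PySem.List.pyGetD l (i + 1) ' ') c
      then t ++ c.toList
      else t ++ [PySem.List.pyGetD l i ' ']) = fun t i => t ++ hfun c l i := by
    funext t i
    unfold hfun
    split <;> rfl
  rw [h, PySem.List.foldl_append_eq_flatMap]
  simp

lemma hfun_shift (c : String) (a : Char) (r : List Char) (k : Nat) :
    hfun c (a :: r) (1 + (k : Int)) = hfun c r ((k : Int)) := by
  have h1 : (1 : Int) + (k : Int) = ((k + 1 : Nat) : Int) := by push_cast; ring
  have h2 : ((k + 1 : Nat) : Int) + 1 = ((k + 1 + 1 : Nat) : Int) := by push_cast; ring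
  have h3 : (k : Int) + 1 = ((k + 1 : Nat) : Int) := by push_cast; ring
  unfold hfun
  rw [h1, h2, h3]
  simp only [PySem.List.pyGetD_natCast, List.getD_cons_succ]

lemma flat_shift (c : String) (a : Char) (r : List Char) (n : Nat) :
    (PySem.List.pyRange 1 ((n : Int) + 1) 1).flatMap (hfun c (a :: r)) =
    (PySem.List.pyRange 0 ((n : Int)) 1).flatMap (hfun c r) := by
  rw [PySem.List.pyRange_one, PySem.List.pyRange_one]
  have e1 : ((n : Int) + 1 - 1).toNat = n := by omega
  have e2 : ((n : Int) - 0).toNat = n := by omega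
  rw [e1, e2, List.flatMap_map, List.flatMap_map]
  simp only [hfun_shift, zero_add]

lemma flat_eq_stepL (c : String) : ∀ l : List Char,
    (PySem.List.pyRange 0 ((l.length : Int) - 1) 1).flatMap (hfun c l) = stepL c l := by
  intro l
  induction l with
  | nil => rw [PySem.List.pyRange_one_eq_nil (by simp)]; rfl
  | cons x xs ih =>
    cases xs with
    | nil => rw [PySem.List.pyRange_one_eq_nil (by simp)]; rfl
    | cons y ys =>
      have hb : ((x :: y :: ys).length : Int) - 1 = (ys.length : Int) + 1 := by
        push_cast [List.length_cons]; ring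
      rw [hb, PySem.List.pyRange_one_cons (by positivity), List.flatMap_cons]
      have h01 : (0 : Int) + 1 = 1 := by norm_num
      rw [h01]
      have hb2 : ((y :: ys).length : Int) - 1 = (ys.length : Int) := by simp
      rw [flat_shift c x (y :: ys) ys.length, ← hb2, ih]
      have h0 : hfun c (x :: y :: ys) 0 = (if pvMch x c || pvMch y c then c.toList else [x]) := by
        unfold hfun
        have : (0 : Int) + 1 = ((1 : Nat) : Int) := by norm_num
        rw [this, PySem.List.pyGetD_zero_cons, PySem.List.pyGetD_natCast]
        rfl
      rw [h0]
      rfl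

lemma pvStepA_eq_stepL (c : String) (l : List Char) : pvStepA l c = stepL c l := by
  rw [pvStepA_eq_flat, flat_eq_stepL]


-- one round when c is the single character d: position i becomes d iff l[i]=d or l[i+1]=d
def stp (d : Char) : List Char → List Char
  | x :: y :: xs => (if x = d ∨ y = d then d else x) :: stp d (y :: xs)
  | _ => []


-- distance from the front to the first d (= length when there is no d)
def dval (d : Char) : List Char → Nat
  | [] => 0
  | x :: xs => if x = d then 0 else dval d xs + 1


-- maximum of dval over all suffixes
def bval (d : Char) : List Char → Nat
  | [] => 0
  | x :: xs => max (bval d xs) (if x = d then 0 else dval d xs + 1)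

lemma stepL_eq_stp (c : String) (d : Char) (h : c.toList = [d]) : ∀ l : List Char,
    stepL c l = stp d l := by
  intro l
  induction l with
  | nil => rfl
  | cons x xs ih =>
    cases xs with
    | nil => rfl
    | cons y ys =>
      have hm : ∀ z : Char, pvMch z c = decide (z = d) := by
        intro z; unfold pvMch; rw [h]
        rw [Bool.eq_iff_iff]; simp
      show (if pvMch x c || pvMch y c then c.toList else [x]) ++ stepL c (y :: ys) =
        (if x = d ∨ y = d then d else x) :: stp d (y :: ys)
      rw [ih, hm, hm, h]
      by_cases hx : x = d
      · simp [hx]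
      · by_cases hy : y = d <;> simp [hx, hy]

lemma stepL_eq_dropLast (c : String) : ∀ l : List Char,
    (∀ x ∈ l, pvMch x c = false) → stepL c l = l.dropLast := by
  intro l
  induction l with
  | nil => intro _; rfl
  | cons x xs ih =>
    cases xs with
    | nil => intro _; rfl
    | cons y ys =>
      intro hnm
      show (if pvMch x c || pvMch y c then c.toList else [x]) ++ stepL c (y :: ys) =
        (x :: y :: ys).dropLast
      rw [hnm x (by simp), hnm y (by simp), ih (fun z hz => hnm z (List.mem_cons_of_mem _ hz))]
      simp

lemma dval_stp (d : Char) : ∀ l : List Char, dval d (stp d l) = dval d l - 1 := by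
  intro l
  induction l with
  | nil => simp [stp, dval]
  | cons x xs ih =>
    cases xs with
    | nil => simp [stp, dval]; split <;> omega
    | cons y ys =>
      show dval d ((if x = d ∨ y = d then d else x) :: stp d (y :: ys)) = _
      by_cases hx : x = d
      · simp [dval, hx]
      · by_cases hy : y = d
        · simp [dval, hx, hy]
        · have h1 : dval d (y :: ys) = dval d ys + 1 := by simp [dval, hy]
          have h2 : (if x = d ∨ y = d then d else x) = x := by simp [hx, hy]
          rw [h2]
          have h0 : dval d (x :: y :: ys) = dval d (y :: ys) + 1 := by simp [dval, hx]
          have h3 : dval d (x :: stp d (y :: ys)) = dval d (stp d (y :: ys)) + 1 := by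
            simp [dval, hx]
          rw [h3, ih, h0, h1]
          omega

lemma bval_stp (d : Char) : ∀ l : List Char, bval d (stp d l) = bval d l - 1 := by
  intro l
  induction l with
  | nil => simp [stp, bval]
  | cons x xs ih =>
    cases xs with
    | nil => simp [stp, bval, dval]; split <;> omega
    | cons y ys =>
      show bval d ((if x = d ∨ y = d then d else x) :: stp d (y :: ys)) = _
      have hd := dval_stp d (x :: y :: ys)
      have hdd : dval d ((if x = d ∨ y = d then d else x) :: stp d (y :: ys)) =
          dval d (x :: y :: ys) - 1 := hd
      simp only [bval] at *
      rw [ih]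
      -- goal: max (bval d (y::ys) - 1) (if head = d then 0 else dval (stp (y::ys)) + 1)
      --     = max (bval d (y::ys)) (if x = d then 0 else dval (y::ys) + 1) - 1
      by_cases hx : x = d
      · simp only [dval, if_pos (show x = d ∨ y = d from Or.inl hx), if_pos hx] at hdd ⊢
        omega
      · by_cases hy : y = d
        · simp only [dval, if_pos (show x = d ∨ y = d from Or.inr hy), if_neg hx] at hdd ⊢
          omega
        · simp only [dval, if_neg (show ¬(x = d ∨ y = d) by tauto), if_neg hx] at hdd ⊢
          omega

lemma dval_le (d : Char) (l : List Char) : dval d l ≤ l.length := by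
  induction l with
  | nil => simp [dval]
  | cons x xs ih => simp only [dval, List.length_cons]; split <;> omega

lemma bval_le (d : Char) (l : List Char) : bval d l ≤ l.length := by
  induction l with
  | nil => simp [bval]
  | cons x xs ih =>
    have := dval_le d xs
    simp only [bval, List.length_cons]
    split <;> omega

lemma bval_eq_zero_iff (d : Char) (l : List Char) : bval d l = 0 ↔ ∀ x ∈ l, x = d := by
  induction l with
  | nil => simp [bval]
  | cons x xs ih =>
    by_cases hx : x = d
    · simp [bval, hx, ih]
    · simp [bval, hx, ih]

lemma mem_stp (d : Char) : ∀ l : List Char, d ∈ l → 2 ≤ l.length → d ∈ stp d l := by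
  intro l
  induction l with
  | nil => intro h _; exact absurd h (by simp)
  | cons x xs ih =>
    cases xs with
    | nil => intro _ h2; simp at h2
    | cons y ys =>
      intro hd _
      show d ∈ (if x = d ∨ y = d then d else x) :: stp d (y :: ys)
      by_cases hxy : x = d ∨ y = d
      · simp [hxy]
      · push Not at hxy
        have hd' : d ∈ y :: ys := by
          rcases List.mem_cons.mp hd with h | h
          · exact absurd h.symm hxy.1
          · exact h
        have hys : ys ≠ [] := by
          rintro rfl
          rcases List.mem_cons.mp hd' with h | h
          · exact hxy.2 h.symm
          · simp at h
        have : d ∈ stp d (y :: ys) := by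
          apply ih hd'
          cases ys with
          | nil => exact absurd rfl hys
          | cons z zs => simp
        exact List.mem_cons_of_mem _ this

lemma setlen_one_iff (l : List Char) :
    PySem.Set.len (PySem.Set.ofList l) = 1 ↔ ∃ a, l ≠ [] ∧ ∀ x ∈ l, x = a := by
  have hlen : PySem.Set.len (PySem.Set.ofList l) = ((PySem.Set.ofList l).length : Int) := rfl
  rw [hlen]
  constructor
  · intro h
    have h1 : (PySem.Set.ofList l).length = 1 := by exact_mod_cast h
    obtain ⟨a, ha⟩ := List.length_eq_one_iff.mp h1
    refine ⟨a, ?_, ?_⟩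
    · rintro rfl
      rw [PySem.Set.ofList_nil] at ha
      simp at ha
    · intro x hx
      have : x ∈ PySem.Set.ofList l := (PySem.Set.mem_ofList l x).mpr hx
      rw [ha] at this
      simpa using this
  · rintro ⟨a, hne, hall⟩
    have ha : a ∈ l := by
      cases l with
      | nil => exact absurd rfl hne
      | cons x xs => exact (hall x (by simp)) ▸ List.mem_cons_self
    have hmem : a ∈ PySem.Set.ofList l := (PySem.Set.mem_ofList l a).mpr ha
    have hnd := PySem.Set.nodup_ofList l
    have hall' : ∀ x ∈ PySem.Set.ofList l, x = a := fun x hx =>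
      hall x ((PySem.Set.mem_ofList l x).mp hx)
    have : PySem.Set.ofList l = [a] := by
      cases hset : PySem.Set.ofList l with
      | nil => rw [hset] at hmem; simp at hmem
      | cons b rest =>
        rw [hset] at hall' hnd
        have hb : b = a := hall' b (by simp)
        have : rest = [] := by
          apply List.eq_nil_iff_forall_not_mem.mpr
          intro y hy
          have : y = a := hall' y (List.mem_cons_of_mem _ hy)
          have : y = b := by rw [this, hb]
          exact absurd (this ▸ hy) ((List.nodup_cons.mp hnd).1)
        rw [hb, this]
    rw [this]
    rfl

lemma pvPref_le (x : Char) (xs : List Char) : pvPref x xs ≤ xs.length := by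
  induction xs with
  | nil => simp [pvPref]
  | cons y ys ih => simp only [pvPref, List.length_cons]; split <;> omega

lemma pvPref_eq_length_iff (x : Char) (xs : List Char) :
    pvPref x xs = xs.length ↔ ∀ y ∈ xs, y = x := by
  induction xs with
  | nil => simp [pvPref]
  | cons y ys ih =>
    simp only [pvPref, List.length_cons, List.mem_cons]
    by_cases hy : y = x
    · rw [if_pos (by simp [hy])]
      constructor
      · intro h z hz
        rcases hz with rfl | hz
        · exact hy
        · exact ih.mp (by omega) z hz
      · intro h
        have : pvPref x ys = ys.length := ih.mpr (fun z hz => h z (Or.inr hz))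
        omega
    · rw [if_neg (by simp [hy])]
      have hle := pvPref_le x ys
      constructor
      · intro h; exact absurd h.symm (by omega)
      · intro h; exact absurd (h y (Or.inl rfl)) hy

lemma pvPref_dropLast (x : Char) : ∀ xs : List Char, pvPref x xs < xs.length →
    pvPref x xs.dropLast = pvPref x xs := by
  intro xs
  induction xs with
  | nil => intro h; simp at h
  | cons y ys ih =>
    cases ys with
    | nil =>
      intro h
      have hy : ¬ (y == x) = true := by
        intro hb; simp [pvPref, hb] at h
      show pvPref x [] = pvPref x [y]
      simp [pvPref, hy]
    | cons z zs =>
      intro h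
      have hdl : (y :: z :: zs).dropLast = y :: (z :: zs).dropLast := rfl
      rw [hdl]
      by_cases hy : (y == x) = true
      · have e1 : pvPref x (y :: (z :: zs).dropLast) = 1 + pvPref x ((z :: zs).dropLast) := by
          rw [pvPref, if_pos hy]
        have e2 : pvPref x (y :: z :: zs) = 1 + pvPref x (z :: zs) := by
          rw [pvPref, if_pos hy]
        rw [e2] at h
        rw [e1, e2, ih (by simp only [List.length_cons] at h ⊢; omega)]
      · have e1 : pvPref x (y :: (z :: zs).dropLast) = 0 := by rw [pvPref, if_neg hy]
        have e2 : pvPref x (y :: z :: zs) = 0 := by rw [pvPref, if_neg hy]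
        rw [e1, e2]

lemma scan_eq (d : Char) (l : List Char) :
    pvScan l d = (bval d l, dval d l) := by
  unfold pvScan
  rw [List.foldl_reverse]
  induction l with
  | nil => simp [bval, dval]
  | cons x xs ih =>
    rw [List.foldr_cons, ih]
    by_cases hx : x = d
    · simp only [bval, dval, if_pos hx, if_pos (show (x == d) = true by simp [hx])]
      have : ¬ (0 > bval d xs) := by omega
      simp [this]
    · simp only [bval, dval, if_neg hx, if_neg (show ¬ (x == d) = true by simp [hx])]
      simp only [Prod.mk.injEq]
      exact ⟨by split <;> omega, trivial⟩

lemma loopA (c : String) (d : Char) (hc : c.toList = [d]) :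
    ∀ (fuel : Nat) (l : List Char) (r : Int), d ∈ l → bval d l ≤ fuel →
      pvLoopA fuel l c r = r + (bval d l : Int) := by
  intro fuel
  induction fuel with
  | zero =>
    intro l r _ hle
    have h0 : bval d l = 0 := Nat.le_zero.mp hle
    simp [pvLoopA, h0]
  | succ n ih =>
    intro l r hd hle
    simp only [pvLoopA]
    by_cases hu : PySem.Set.len (PySem.Set.ofList l) = 1
    · rw [if_neg (by simpa using hu)]
      obtain ⟨a, hne, hall⟩ := (setlen_one_iff l).mp hu
      have hald : ∀ x ∈ l, x = d := fun x hx => (hall x hx).trans (hall d hd).symm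
      have hb : bval d l = 0 := (bval_eq_zero_iff d l).mpr hald
      simp [hb]
    · rw [if_pos (by simpa using hu)]
      have hne : l ≠ [] := List.ne_nil_of_mem hd
      have h2 : 2 ≤ l.length := by
        rcases l with _ | ⟨x, _ | ⟨y, ys⟩⟩
        · exact absurd rfl hne
        · exact absurd ((setlen_one_iff [x]).mpr ⟨x, by simp, by simp⟩) hu
        · simp
      have hb1 : 1 ≤ bval d l := by
        by_contra hb
        have h0 : bval d l = 0 := by omega
        exact hu ((setlen_one_iff l).mpr ⟨d, hne, (bval_eq_zero_iff d l).mp h0⟩)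
      rw [pvStepA_eq_stepL, stepL_eq_stp c d hc]
      rw [ih (stp d l) (r + 1) (mem_stp d l hd h2) (by rw [bval_stp]; omega)]
      rw [bval_stp]
      omega

lemma loopB (c : String) :
    ∀ (fuel : Nat) (x : Char) (xs : List Char) (r : Int),
      (∀ y ∈ x :: xs, pvMch y c = false) → xs.length - pvPref x xs ≤ fuel →
      pvLoopA fuel (x :: xs) c r = r + ((xs.length - pvPref x xs : Nat) : Int) := by
  intro fuel
  induction fuel with
  | zero =>
    intro x xs r _ hle
    have h0 : xs.length - pvPref x xs = 0 := Nat.le_zero.mp hle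
    simp [pvLoopA, h0]
  | succ n ih =>
    intro x xs r hnm hle
    simp only [pvLoopA]
    by_cases hu : PySem.Set.len (PySem.Set.ofList (x :: xs)) = 1
    · rw [if_neg (by simpa using hu)]
      obtain ⟨a, _, hall⟩ := (setlen_one_iff (x :: xs)).mp hu
      have hax : ∀ y ∈ xs, y = x :=
        fun y hy => (hall y (List.mem_cons_of_mem _ hy)).trans (hall x List.mem_cons_self).symm
      have hp : pvPref x xs = xs.length := (pvPref_eq_length_iff x xs).mpr hax
      simp [hp]
    · rw [if_pos (by simpa using hu)]
      have hlt : pvPref x xs < xs.length := by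
        rcases Nat.lt_or_ge (pvPref x xs) xs.length with h | h
        · exact h
        · have heq : pvPref x xs = xs.length := le_antisymm (pvPref_le x xs) h
          have hax := (pvPref_eq_length_iff x xs).mp heq
          exact absurd ((setlen_one_iff (x :: xs)).mpr
            ⟨x, by simp, by
              intro z hz
              rcases List.mem_cons.mp hz with rfl | hz
              · rfl
              · exact hax z hz⟩) hu
      rcases xs with _ | ⟨y, ys⟩
      · simp at hlt
      · rw [pvStepA_eq_stepL, stepL_eq_dropLast c _ hnm]
        have hdl : (x :: y :: ys).dropLast = x :: (y :: ys).dropLast := rfl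
        rw [hdl]
        have hnm' : ∀ z ∈ x :: (y :: ys).dropLast, pvMch z c = false := by
          intro z hz
          rcases List.mem_cons.mp hz with rfl | hz
          · exact hnm z List.mem_cons_self
          · exact hnm z (List.mem_cons_of_mem _ (List.dropLast_subset _ hz))
        have hpd : pvPref x (y :: ys).dropLast = pvPref x (y :: ys) := pvPref_dropLast x _ hlt
        have hld : ((y :: ys).dropLast).length = (y :: ys).length - 1 := List.length_dropLast
        rw [ih x ((y :: ys).dropLast) (r + 1) hnm' (by rw [hpd, hld]; omega)]
        rw [hpd, hld]
        have hlen : 1 ≤ (y :: ys).length := by simp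
        omega

lemma noMatchCase (c : String) (x : Char) (xs : List Char)
    (hnm : ∀ y ∈ x :: xs, pvMch y c = false) :
    pvLoopA (x :: xs).length (x :: xs) c 0 = pvRunBranch (x :: xs) := by
  have hle : xs.length - pvPref x xs ≤ (x :: xs).length := by simp; omega
  rw [loopB c _ x xs 0 hnm hle]
  unfold pvRunBranch pvRun
  have := pvPref_le x xs
  simp only [List.length_cons]
  omega

lemma matchCase (c : String) (d : Char) (hc : c.toList = [d]) (x : Char) (xs : List Char)
    (hd : d ∈ x :: xs) :
    pvLoopA (x :: xs).length (x :: xs) c 0 = (bval d (x :: xs) : Int) := by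
  rw [loopA c d hc _ _ 0 hd (bval_le d _)]
  simp

theorem f_eq (s c : String) (hpre : s.toList ≠ []) : f s c = f_alt s c := by
  obtain ⟨x, xs, hs⟩ : ∃ x xs, s.toList = x :: xs := by
    cases h : s.toList with
    | nil => exact absurd h hpre
    | cons x xs => exact ⟨x, xs, rfl⟩
  unfold f f_alt
  rw [hs]
  rcases hc : c.toList with _ | ⟨d, _ | ⟨e, rest⟩⟩
  · show _ = pvRunBranch (x :: xs)
    exact noMatchCase c x xs (fun y _ => by simp [pvMch, hc])
  · show _ = if (x :: xs).contains d = true then ((pvScan (x :: xs) d).1 : Int)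
      else pvRunBranch (x :: xs)
    by_cases hmem : d ∈ x :: xs
    · have hcont : (x :: xs).contains d = true := by
        rw [List.contains_eq_mem]; simp [hmem]
      rw [hcont, if_pos rfl, scan_eq]
      exact matchCase c d hc x xs hmem
    · have hcont : (x :: xs).contains d = false := by
        rw [List.contains_eq_mem]; simp [hmem]
      rw [hcont]
      simp only [Bool.false_eq_true, if_false]
      refine noMatchCase c x xs (fun y hy => ?_)
      have hyd : y ≠ d := fun h => hmem (h ▸ hy)
      simp [pvMch, hc, hyd]
  · show _ = pvRunBranch (x :: xs)
    exact noMatchCase c x xs (fun y _ => by simp [pvMch, hc])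

-- ===== VERDICT (by name: the statement is the Claim_ definition above) =====
theorem f_spec : Claim_equal_f := by
  intro s c _ hpre
  unfold Spec_f
  exact f_eq s c hpre
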